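-- pv_equiv track=rewrite | github.com/hudcostreets/nj-crashes | njdot/agg.py | parse_dims
-- ===== SOURCE A (Python) =====
-- DIMS = {
--     'y': 'year',
--     'm': 'month',
--     'cc': 'cc',
--     'mc': 'mc',
--     's': 'severity',
-- }
--
-- def parse_dims(agg_name: str) -> list[str]:
--     """Parse dimension codes from aggregation name.
--
--     Handles multi-char codes like 'cc', 'mc'.
--     E.g., 'ymccs' -> ['y', 'm', 'cc', 's']
--     """
--     dims = []
--     i = 0
--     while i < len(agg_name):
--         # Check for two-char codes first
--         if i + 1 < len(agg_name):
--             two_char = agg_name[i:i+2]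
--             if two_char in DIMS:
--                 dims.append(two_char)
--                 i += 2
--                 continue
--         # Single char
--         dims.append(agg_name[i])
--         i += 1
--     return dims
-- ===== SOURCE B (Python) =====
-- import re
--
-- def parse_dims(agg_name: str) -> list[str]:
--     """Parse dimension codes from aggregation name.
--
--     Single regex tokenization: the alternation prefers the two-char codes,
--     matching the manual index-stepping parser exactly.
--     """
--     return re.findall(r'cc|mc|[\s\S]', agg_name)
-- ===== Notes on version B (the rewrite author's own statement) =====
-- stated objective: idiomatic
-- what changed: Replaced the manual index-stepping while-loop parser with a single regex tokenization re.findall(r'cc|mc|[\s\S]', agg_name), whose greedy alternation prefers the two-char codes exactly as the loop does.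
import Mathlib
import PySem

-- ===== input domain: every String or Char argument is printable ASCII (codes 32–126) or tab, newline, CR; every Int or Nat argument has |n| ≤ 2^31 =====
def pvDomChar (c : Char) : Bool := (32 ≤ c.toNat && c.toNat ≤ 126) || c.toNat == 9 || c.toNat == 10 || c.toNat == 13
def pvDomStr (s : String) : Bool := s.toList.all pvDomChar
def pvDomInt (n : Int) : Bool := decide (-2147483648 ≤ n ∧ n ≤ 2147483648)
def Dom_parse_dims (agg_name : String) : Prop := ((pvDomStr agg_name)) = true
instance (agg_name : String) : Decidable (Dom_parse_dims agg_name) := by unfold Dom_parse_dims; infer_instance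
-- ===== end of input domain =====

-- B replaces A's index-stepping while-loop with a single greedy tokenization
-- (Python: one re.findall with the two-char codes first in the alternation); idiomatic, same cost.

-- ===== PORT A =====
-- module constant DIMS
def DIMS : PySem.Dict String String :=
  PySem.Dict.ofList [("y", "year"), ("m", "month"), ("cc", "cc"), ("mc", "mc"), ("s", "severity")]

-- A's while-loop: index i stepped by 1 or 2; fuel = length of the string bounds the iterations.
def parseLoopA (cs : List Char) : Nat → Nat → List String → List String
  | 0, _, dims => dims
  | fuel + 1, i, dims =>
    if i < cs.length then
      -- check for two-char codes first
      if i + 1 < cs.length then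
        let two_char := String.ofList (PySem.List.slice cs (some (i : Int)) (some ((i : Int) + 2)))
        if DIMS.contains two_char then
          parseLoopA cs fuel (i + 2) (dims ++ [two_char])
        else
          parseLoopA cs fuel (i + 1) (dims ++ [String.ofList [PySem.List.pyGetD cs (i : Int) ' ']])
      else
        parseLoopA cs fuel (i + 1) (dims ++ [String.ofList [PySem.List.pyGetD cs (i : Int) ' ']])
    else dims

def parse_dims (agg_name : String) : List String :=
  parseLoopA agg_name.toList agg_name.toList.length 0 []

-- ===== PORT B =====
-- port of re.findall(r'cc|mc|[\s\S]', s): greedy scan preferring the two-char alternatives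
def tokenizeB : List Char → List String
  | [] => []
  | [c] => [String.ofList [c]]
  | a :: b :: rest =>
    if a = 'c' ∧ b = 'c' then "cc" :: tokenizeB rest
    else if a = 'm' ∧ b = 'c' then "mc" :: tokenizeB rest
    else String.ofList [a] :: tokenizeB (b :: rest)

def parse_dims_alt (agg_name : String) : List String :=
  tokenizeB agg_name.toList

-- ===== PRECONDITION & SPEC =====
def Spec_parse_dims (agg_name : String) (out : List String) : Prop := out = parse_dims_alt agg_name
instance (agg_name : String) (out : List String) : Decidable (Spec_parse_dims agg_name out) := by unfold Spec_parse_dims; infer_instance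

-- ===== CLAIM (what is proved, stated in full; the proofs are below) =====
def Claim_equal_parse_dims : Prop := ∀ (agg_name : String), Dom_parse_dims agg_name → Spec_parse_dims agg_name (parse_dims agg_name)

-- ===== LEMMAS AND PROOFS =====

-- a one-char key never equals a two-char string
theorem beq_lit_single (x a b : Char) :
    (String.ofList [x] == String.ofList [a, b]) = false := by
  rw [beq_eq_false_iff_ne]
  intro h
  have := congrArg String.toList h
  simp at this

-- a two-char key compared with a two-char string, componentwise
theorem beq_lit_pair (x y a b : Char) :
    (String.ofList [x, y] == String.ofList [a, b]) = (a = x ∧ b = y : Bool) := by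
  by_cases h : String.ofList [x, y] = String.ofList [a, b]
  · have h2 := congrArg String.toList h
    simp at h2
    obtain ⟨rfl, rfl⟩ := h2
    simp
  · rw [beq_eq_false_iff_ne.2 h]
    symm
    simp only [decide_eq_false_iff_not]
    rintro ⟨rfl, rfl⟩
    exact h rfl

-- DIMS membership of a two-char string is exactly "cc" or "mc"
theorem contains_DIMS (a b : Char) :
    DIMS.contains (String.ofList [a, b]) = ((a = 'c' ∧ b = 'c') ∨ (a = 'm' ∧ b = 'c') : Bool) := by
  have k1 := beq_lit_single 'y' a b
  have k2 := beq_lit_single 'm' a b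
  have k3 := beq_lit_pair 'c' 'c' a b
  have k4 := beq_lit_pair 'm' 'c' a b
  have k5 := beq_lit_single 's' a b
  rw [show DIMS = PySem.Dict.mk [("y", "year"), ("m", "month"), ("cc", "cc"), ("mc", "mc"), ("s", "severity")] from rfl]
  rw [show ("y" : String) = String.ofList ['y'] from rfl,
     show ("m" : String) = String.ofList ['m'] from rfl,
     show ("cc" : String) = String.ofList ['c', 'c'] from rfl,
     show ("mc" : String) = String.ofList ['m', 'c'] from rfl,
     show ("s" : String) = String.ofList ['s'] from rfl]
  simp only [PySem.Dict.contains, List.any_cons, List.any_nil,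
    k1, k2, k3, k4, k5, Bool.false_or, Bool.or_false]
  simp

-- loop invariant: with enough fuel, A's loop from index i appends B's tokenization of the rest
theorem parseLoopA_eq (cs : List Char) (fuel : Nat) : ∀ (i : Nat) (dims : List String),
    cs.length ≤ fuel + i →
    parseLoopA cs fuel i dims = dims ++ tokenizeB (cs.drop i) := by
  induction fuel with
  | zero =>
    intro i dims h
    have hd : cs.drop i = [] := List.drop_eq_nil_of_le (by omega)
    simp [parseLoopA, hd, tokenizeB]
  | succ fuel ih =>
    intro i dims h
    by_cases hi : i < cs.length
    · have hdrop : cs.drop i = cs[i] :: cs.drop (i + 1) := List.drop_eq_getElem_cons hi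
      by_cases hi1 : i + 1 < cs.length
      · have hdrop1 : cs.drop (i + 1) = cs[i + 1] :: cs.drop (i + 2) := by
          simpa using List.drop_eq_getElem_cons hi1
        have hslice : PySem.List.slice cs (some (i : Int)) (some ((i : Int) + 2)) = [cs[i], cs[i + 1]] := by
          rw [show ((i : Int) + 2) = ((i + 2 : Nat) : Int) by push_cast; ring,
            PySem.List.slice_natCast, show i + 2 - i = 2 by omega, hdrop, hdrop1]
          rfl
        have hget : PySem.List.pyGetD cs (i : Int) ' ' = cs[i] := by
          rw [PySem.List.pyGetD_natCast]
          exact List.getD_eq_getElem cs ' ' hi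
        simp only [parseLoopA, if_pos hi, if_pos hi1, hslice, hget]
        rw [contains_DIMS]
        by_cases hcase : (cs[i] = 'c' ∧ cs[i + 1] = 'c') ∨ (cs[i] = 'm' ∧ cs[i + 1] = 'c')
        · rw [if_pos (by simpa using hcase)]
          rw [ih (i + 2) _ (by omega), hdrop, hdrop1]
          rcases hcase with ⟨h1, h2⟩ | ⟨h1, h2⟩ <;>
            simp [tokenizeB, h1, h2, List.append_assoc]
        · rw [if_neg (by simpa using hcase)]
          rw [ih (i + 1) _ (by omega), hdrop, hdrop1]
          have e1 : ¬(cs[i] = 'c' ∧ cs[i + 1] = 'c') := fun hc => hcase (Or.inl hc)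
          have e2 : ¬(cs[i] = 'm' ∧ cs[i + 1] = 'c') := fun hc => hcase (Or.inr hc)
          simp [tokenizeB, e1, e2, List.append_assoc]
      · have hget : PySem.List.pyGetD cs (i : Int) ' ' = cs[i] := by
          rw [PySem.List.pyGetD_natCast]
          exact List.getD_eq_getElem cs ' ' hi
        have hdrop1 : cs.drop (i + 1) = [] := List.drop_eq_nil_of_le (by omega)
        simp only [parseLoopA, if_pos hi, if_neg hi1, hget]
        rw [ih (i + 1) _ (by omega), hdrop, hdrop1]
        simp [tokenizeB]
    · have hd : cs.drop i = [] := List.drop_eq_nil_of_le (by omega)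
      simp [parseLoopA, if_neg hi, hd, tokenizeB]

-- ===== VERDICT (by name: the statement is the Claim_ definition above) =====
theorem parse_dims_spec : Claim_equal_parse_dims := by
  intro agg_name _
  unfold Spec_parse_dims parse_dims parse_dims_alt
  simpa using parseLoopA_eq agg_name.toList agg_name.toList.length 0 [] (by omega)
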